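-- pv_equiv track=rewrite | github.com/selaux/master-of-bones | helpers/geometry.py | extract_circle
-- ===== SOURCE A (Python) =====
-- def extract_circle(outline_unsorted):
--     if len(outline_unsorted) == 0:
--         return None
--
--     outline = []
--
--     outline.append([ outline_unsorted[0][0], outline_unsorted[0][1] ])
--     del outline_unsorted[0]
--     init = outline[0][0]
--     while outline[-1][1] != init:
--         found = False
--         look_for = outline[-1][1]
--         for i in range(0, len(outline_unsorted)):
--             edge = outline_unsorted[i]
--             if edge[0] == look_for:
--                 found = True
--                 outline.append([ edge[0], edge[1] ])
--             if edge[1] == look_for: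
--                 found = True
--                 outline.append([ edge[1], edge[0] ])
--             if found:
--                 del outline_unsorted[i]
--                 break
--         if not found:
--             return None
--     return outline
-- ===== SOURCE B (Python) =====
-- # Indexed re-implementation: one pass builds vertex -> ascending incident-edge-index
-- # buckets, then each step pops the smallest-index unused incident edge via a per-vertex
-- # pointer (amortized O(1)) instead of rescanning the whole remaining list.
-- # Note: A mutates its argument (deletes consumed edges); B does not. Equivalence is
-- # about the return value only.
-- def extract_circle(outline_unsorted):
--     n = len(outline_unsorted)
--     if n == 0:
--         return None
--     edges = [(e[0], e[1]) for e in outline_unsorted]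
--     inc = {}
--     for i in range(1, n):
--         a, b = edges[i]
--         inc.setdefault(a, []).append(i)
--         if b != a:
--             inc.setdefault(b, []).append(i)
--     pos = {}
--     used = [False] * n
--     a0, b0 = edges[0]
--     outline = [[a0, b0]]
--     init = a0
--     look = b0
--     while look != init:
--         lst = inc.get(look, [])
--         p = pos.get(look, 0)
--         while p < len(lst) and used[lst[p]]:
--             p += 1
--         pos[look] = p
--         if p >= len(lst):
--             return None
--         i = lst[p]
--         used[i] = True
--         a, b = edges[i]
--         if a == look:
--             outline.append([a, b])
--         if b == look:
--             outline.append([b, a])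
--         look = outline[-1][1]
--     return outline
-- ===== Notes on version B (the rewrite author's own statement) =====
-- stated objective: alternative
-- what changed: A rescans the whole remaining edge list on every step of the chain; B instead builds a vertex-to-incident-edge-index bucket table once and pops the smallest-index unused incident edge via a per-vertex pointer (worst-case O(n) work overall versus A's O(n^2) rescans, though a timing run could not measure a difference on the generated inputs).
-- outside the precondition, e.g. on extract_circle([[1, 1], [2]]): A returns [[1, 1]], B raises IndexError
import Mathlib
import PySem

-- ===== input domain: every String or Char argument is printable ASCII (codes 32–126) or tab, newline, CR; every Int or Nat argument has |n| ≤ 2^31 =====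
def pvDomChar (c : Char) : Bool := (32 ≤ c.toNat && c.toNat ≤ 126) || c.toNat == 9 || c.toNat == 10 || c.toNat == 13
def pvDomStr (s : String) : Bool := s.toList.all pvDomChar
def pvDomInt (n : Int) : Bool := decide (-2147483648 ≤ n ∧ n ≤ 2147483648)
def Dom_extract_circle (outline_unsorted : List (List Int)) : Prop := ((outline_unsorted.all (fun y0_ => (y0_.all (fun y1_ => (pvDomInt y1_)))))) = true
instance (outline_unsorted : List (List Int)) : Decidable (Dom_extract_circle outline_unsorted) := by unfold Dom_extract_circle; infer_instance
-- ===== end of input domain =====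

-- B replaces A's per-step rescan of the whole remaining edge list by a vertex→incident-edge-index
-- bucket built once up front, popping the smallest-index unused incident edge via a per-vertex pointer.
-- NOTE: Python A deletes consumed edges from the caller's list, B does not mutate its argument;
-- the equivalence proved here is about the return value only.

-- e[0] / e[1]; exact when e has at least two elements (guaranteed by Pre_extract_circle)
def edge0 (e : List Int) : Int := e.getD 0 0
def edge1 (e : List Int) : Int := e.getD 1 0

-- ===== PORT A =====
-- the inner 'for i in range(len(outline_unsorted))' loop: scans for the first edge incident to
-- lookFor, returns the entries appended to outline and the list with that edge deleted
def scanA (lookFor : Int) : List (List Int) → Option (List (List Int) × List (List Int))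
  | [] => none
  | e :: rest =>
    let app := (if edge0 e = lookFor then [[edge0 e, edge1 e]] else [])
            ++ (if edge1 e = lookFor then [[edge1 e, edge0 e]] else [])
    if edge0 e = lookFor ∨ edge1 e = lookFor then some (app, rest)
    else
      match scanA lookFor rest with
      | none => none
      | some (app', rest') => some (app', e :: rest')

-- the 'while outline[-1][1] != init' loop; look is outline[-1][1]; fuel = length of the remaining
-- list (one edge is deleted per iteration, so the fuel-0 'none' branch is only reached with rest = [])
def loopA (init : Int) : Nat → Int → List (List Int) → List (List Int) → Option (List (List Int))
  | fuel, look, outline, rest =>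
    if look = init then some outline
    else
      match fuel with
      | 0 => none
      | fuel + 1 =>
        match scanA look rest with
        | none => none
        | some (app, rest') => loopA init fuel (edge1 (app.getLastD [])) (outline ++ app) rest'

def extract_circle (outline_unsorted : List (List Int)) : Option (List (List Int)) :=
  match outline_unsorted with
  | [] => none
  | e :: rest => loopA (edge0 e) rest.length (edge1 e) [[edge0 e, edge1 e]] rest

-- ===== PORT B =====
-- inc.setdefault(v, []).append(i)
def addInc (inc : PySem.Dict Int (List Nat)) (v : Int) (i : Nat) : PySem.Dict Int (List Nat) :=
  inc.insert v (inc.getD v [] ++ [i])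

-- body of B's 'for i in range(1, n)' indexing loop
def incStep (inc : PySem.Dict Int (List Nat)) (x : (Int × Int) × Nat) : PySem.Dict Int (List Nat) :=
  let a := x.1.1
  let b := x.1.2
  let inc1 := addInc inc a x.2
  if b ≠ a then addInc inc1 b x.2 else inc1

-- 'for i in range(1, n): …' over the edges with their indices, skipping index 0
def buildInc (edges : List (Int × Int)) : PySem.Dict Int (List Nat) :=
  (edges.zipIdx.drop 1).foldl incStep PySem.Dict.empty

-- 'while p < len(lst) and used[lst[p]]: p += 1' (fuel = len(lst) suffices: p grows to at most len(lst))
def skipUsed (lst : List Nat) (used : List Bool) : Nat → Nat → Nat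
  | 0, p => p
  | fuel + 1, p =>
    if p < lst.length ∧ used.getD (lst.getD p 0) false = true then skipUsed lst used fuel (p + 1)
    else p

-- B's 'while look != init' loop; fuel = n - 1 (each iteration marks a fresh index of 1..n-1 used,
-- so the fuel-0 'none' branch is only reached when every tail edge has been consumed)
def loopB (edges : List (Int × Int)) (inc : PySem.Dict Int (List Nat)) (init : Int) :
    Nat → PySem.Dict Int Nat → List Bool → List (List Int) → Int → Option (List (List Int))
  | fuel, pos, used, outline, look =>
    if look = init then some outline
    else
      match fuel with
      | 0 => none
      | fuel + 1 =>
        let lst := inc.getD look []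
        let p := skipUsed lst used lst.length (pos.getD look 0)
        let pos' := pos.insert look p
        if p < lst.length then
          let i := lst.getD p 0
          let used' := used.set i true
          let a := (edges.getD i (0, 0)).1
          let b := (edges.getD i (0, 0)).2
          let app := (if a = look then [[a, b]] else []) ++ (if b = look then [[b, a]] else [])
          loopB edges inc init fuel pos' used' (outline ++ app) (edge1 (app.getLastD []))
        else none

def extract_circle_alt (outline_unsorted : List (List Int)) : Option (List (List Int)) :=
  match outline_unsorted with
  | [] => none
  | _ :: _ =>
    let n := outline_unsorted.length
    let edges := outline_unsorted.map (fun e => (edge0 e, edge1 e))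
    let inc := buildInc edges
    let e0 := edges.getD 0 (0, 0)
    loopB edges inc e0.1 (n - 1) PySem.Dict.empty (List.replicate n false) [[e0.1, e0.2]] e0.2

-- ===== PRECONDITION & SPEC =====
-- Pre_ excludes inputs containing an inner list with fewer than two elements: Python A raises
-- IndexError whenever its scan reaches such an edge (and returns a value only when the chain
-- happens to close before reaching it), while B reads every edge's two endpoints up front and
-- always raises there.
def Pre_extract_circle (outline_unsorted : List (List Int)) : Prop :=
  ∀ e ∈ outline_unsorted, 2 ≤ e.length

instance (outline_unsorted : List (List Int)) : Decidable (Pre_extract_circle outline_unsorted) := by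
  unfold Pre_extract_circle; infer_instance

def pvWitness_extract_circle : List (List Int) := [[1, 2], [2, 3], [3, 1]]

def Spec_extract_circle (outline_unsorted : List (List Int)) (out : Option (List (List Int))) : Prop := out = extract_circle_alt outline_unsorted
instance (outline_unsorted : List (List Int)) (out : Option (List (List Int))) : Decidable (Spec_extract_circle outline_unsorted out) := by unfold Spec_extract_circle; infer_instance

-- ===== CLAIM (what is proved, stated in full; the proofs are below) =====
def Claim_equal_extract_circle : Prop := ∀ (outline_unsorted : List (List Int)), Dom_extract_circle outline_unsorted → Pre_extract_circle outline_unsorted → Spec_extract_circle outline_unsorted (extract_circle outline_unsorted)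

-- ===== LEMMAS AND PROOFS =====

-- proof-only abbreviations
def projE (e : List Int) : Int × Int := (edge0 e, edge1 e)

-- is the pair p incident to v (the condition both programs test)
def incP (v : Int) (p : Int × Int) : Bool := decide (p.1 = v) || decide (p.2 = v)

-- the entries both programs append for the pair p found while looking for look
def appOf (look : Int) (p : Int × Int) : List (List Int) :=
  (if p.1 = look then [[p.1, p.2]] else []) ++ (if p.2 = look then [[p.2, p.1]] else [])

-- getD of a set Bool list
theorem getD_set_bool (l : List Bool) (i j : Nat) (hi : i < l.length) :
    (l.set i true).getD j false = if j = i then true else l.getD j false := by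
  simp only [List.getD, List.getElem?_set]
  rcases eq_or_ne j i with rfl | h
  · simp [hi]
  · simp [h, h.symm]

theorem used_mono (l : List Bool) (i j : Nat) (h : l.getD j false = true) :
    (l.set i true).getD j false = true := by
  simp only [List.getD, List.getElem?_set] at *
  rcases eq_or_ne i j with rfl | hij
  · by_cases hi : i < l.length <;> simp [hi] at h ⊢
  · simp [hij, h]

theorem addInc_getD (d : PySem.Dict Int (List Nat)) (w : Int) (i : Nat) (v : Int) :
    (addInc d w i).getD v [] = if v = w then d.getD v [] ++ [i] else d.getD v [] := by
  unfold addInc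
  by_cases h : v = w
  · subst h; simp [PySem.Dict.getD, PySem.Dict.get?_insert_self]
  · simp [PySem.Dict.getD, PySem.Dict.get?_insert_of_ne _ _ h, h]

theorem foldl_incStep_getD (ys : List ((Int × Int) × Nat)) (d : PySem.Dict Int (List Nat)) (v : Int) :
    (ys.foldl incStep d).getD v []
      = d.getD v [] ++ (ys.filter (fun x => incP v x.1)).map (·.2) := by
  induction ys generalizing d with
  | nil => simp
  | cons x t ih =>
    have hstep : ∀ w : Int, (incStep d x).getD w []
        = if incP w x.1 = true then d.getD w [] ++ [x.2] else d.getD w [] := by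
      intro w
      unfold incStep
      by_cases hba : x.1.2 = x.1.1
      · rw [if_neg (by simp [hba]), addInc_getD]
        by_cases h1 : w = x.1.1
        · rw [if_pos h1, if_pos (by simp [incP]; omega)]
        · rw [if_neg h1, if_neg (by simp [incP]; omega)]
      · rw [if_pos hba, addInc_getD, addInc_getD]
        by_cases h2 : w = x.1.2
        · rw [if_pos h2, if_neg (by omega), if_pos (by simp [incP]; omega)]
        · rw [if_neg h2]
          by_cases h1 : w = x.1.1
          · rw [if_pos h1, if_pos (by simp [incP]; omega)]
          · rw [if_neg h1, if_neg (by simp [incP]; omega)]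
    rw [List.foldl_cons, ih, hstep v]
    by_cases hx : incP v x.1 = true
    · simp [hx]
    · simp [hx]

theorem buildInc_getD (E : List (Int × Int)) (v : Int) :
    (buildInc E).getD v [] = ((E.zipIdx.drop 1).filter (fun x => incP v x.1)).map (·.2) := by
  unfold buildInc
  rw [foldl_incStep_getD]
  rfl

theorem skipUsed_spec (lst : List Nat) (used : List Bool) :
    ∀ fuel p, lst.length ≤ p + fuel → p ≤ lst.length →
      p ≤ skipUsed lst used fuel p ∧ skipUsed lst used fuel p ≤ lst.length ∧
      (∀ j, p ≤ j → j < skipUsed lst used fuel p → used.getD (lst.getD j 0) false = true) ∧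
      (skipUsed lst used fuel p < lst.length →
        used.getD (lst.getD (skipUsed lst used fuel p) 0) false = false) := by
  intro fuel
  induction fuel with
  | zero =>
    intro p h1 h2
    simp only [skipUsed]
    exact ⟨le_refl _, h2, by omega, by omega⟩
  | succ f ih =>
    intro p h1 h2
    simp only [skipUsed]
    by_cases hc : p < lst.length ∧ used.getD (lst.getD p 0) false = true
    · rw [if_pos hc]
      obtain ⟨hq1, hq2, hq3, hq4⟩ := ih (p + 1) (by omega) (by omega)
      refine ⟨by omega, hq2, ?_, hq4⟩
      intro j hj1 hj2
      rcases eq_or_lt_of_le hj1 with rfl | hlt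
      · exact hc.2
      · exact hq3 j (by omega) hj2
    · rw [if_neg hc]
      refine ⟨le_refl _, h2, by omega, ?_⟩
      intro hlt
      cases hB : used.getD (lst.getD p 0) false with
      | false => rfl
      | true => exact absurd ⟨hlt, hB⟩ hc

theorem head_filter_of_first (f : Nat → Bool) :
    ∀ (lst : List Nat) (q : Nat), q < lst.length →
      (∀ j < q, f (lst.getD j 0) = false) → f (lst.getD q 0) = true →
      (lst.filter f).head? = some (lst.getD q 0) := by
  intro lst
  induction lst with
  | nil => intro q hq; simp at hq
  | cons x t ih =>
    intro q hq hbelow hq'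
    cases q with
    | zero =>
      simp only [List.getD_cons_zero] at hq' ⊢
      simp [hq']
    | succ q =>
      have hx : f x = false := hbelow 0 (Nat.succ_pos q)
      simp only [List.getD_cons_succ] at hq' ⊢
      simp only [List.filter_cons, hx, Bool.false_eq_true, if_false]
      exact ih q (by simpa using hq) (fun j hj => hbelow (j + 1) (by omega)) hq'

theorem scanA_none (look : Int) :
    ∀ (rest : List (List Int)), (∀ e ∈ rest, incP look (projE e) = false) →
      scanA look rest = none := by
  intro rest
  induction rest with
  | nil => intro _; rfl
  | cons e t ih =>
    intro h
    have he : ¬(edge0 e = look ∨ edge1 e = look) := by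
      have := h e (by simp)
      simpa [incP, projE] using this
    simp only [scanA]
    rw [if_neg he, ih (fun x hx => h x (by simp [hx]))]

theorem scanA_found (look : Int) :
    ∀ (pre : List (List Int)) (e : List Int) (post : List (List Int)),
      (∀ x ∈ pre, incP look (projE x) = false) → incP look (projE e) = true →
      scanA look (pre ++ e :: post) = some (appOf look (projE e), pre ++ post) := by
  intro pre
  induction pre with
  | nil =>
    intro e post _ he
    have he' : edge0 e = look ∨ edge1 e = look := by simpa [incP, projE] using he
    simp only [List.nil_append, scanA]
    rw [if_pos he']
    rfl
  | cons x t ih =>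
    intro e post hpre he
    have hx : ¬(edge0 x = look ∨ edge1 x = look) := by
      have := hpre x (by simp)
      simpa [incP, projE] using this
    simp only [List.cons_append, scanA]
    rw [if_neg hx, ih e post (fun y hy => hpre y (by simp [hy])) he]

theorem loop_eq (E : List (Int × Int)) (init : Int) :
    ∀ (fuel : Nat) (look : Int) (outline rest : List (List Int)) (used : List Bool)
      (pos : PySem.Dict Int Nat),
      used.length = E.length →
      rest.map projE = ((E.zipIdx.drop 1).filter (fun x => !used.getD x.2 false)).map (·.1) →
      (∀ v : Int, pos.getD v 0 ≤ ((buildInc E).getD v []).length ∧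
        ∀ j < pos.getD v 0, used.getD (((buildInc E).getD v []).getD j 0) false = true) →
      loopA init fuel look outline rest = loopB E (buildInc E) init fuel pos used outline look := by
  intro fuel
  induction fuel with
  | zero =>
    intro look outline rest used pos _ _ _
    simp only [loopA, loopB]
  | succ f ih =>
    intro look outline rest used pos hlen hrest hpos
    by_cases hli : look = init
    · simp only [loopA, loopB, if_pos hli]
    · simp only [loopA, loopB, if_neg hli]
      obtain ⟨hpos1, hpos2⟩ := hpos look
      obtain ⟨hq1, hq2, hq3, hq4⟩ :=
        skipUsed_spec ((buildInc E).getD look []) used ((buildInc E).getD look []).length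
          (pos.getD look 0) (by omega) hpos1
      set tE := E.zipIdx.drop 1 with htE
      set lst := (buildInc E).getD look [] with hlst
      set q := skipUsed lst used lst.length (pos.getD look 0) with hqdef
      have hbelow : ∀ j < q, used.getD (lst.getD j 0) false = true := by
        intro j hj
        rcases lt_or_ge j (pos.getD look 0) with h | h
        · exact hpos2 j h
        · exact hq3 j h hj
      have hlstchar : lst = (tE.filter (fun x => incP look x.1)).map (·.2) := buildInc_getD E look
      set rem := tE.filter (fun x => !used.getD x.2 false) with hremdef
      set remInc := rem.filter (fun x => incP look x.1) with hremIncdef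
      have hfilter : lst.filter (fun i => !used.getD i false) = remInc.map (·.2) := by
        rw [hlstchar, List.filter_map, hremIncdef, hremdef, List.filter_filter, List.filter_filter]
        apply congrArg
        apply List.filter_congr
        intro a _
        exact Bool.and_comm _ _
      cases hri : remInc with
      | nil =>
        have hnone : scanA look rest = none := by
          apply scanA_none
          intro e he
          have hmem : projE e ∈ rem.map (·.1) := by
            rw [← hrest]
            exact List.mem_map_of_mem he
          obtain ⟨z, hz, hzy⟩ := List.mem_map.mp hmem
          have hz' : ¬(incP look z.1 = true) :=
            List.filter_eq_nil_iff.mp (hremIncdef ▸ hri) z hz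
          rw [← hzy]
          exact Bool.eq_false_iff.mpr (fun hh => hz' hh)
        have hqnot : ¬ q < lst.length := by
          intro hqlt
          have hu := hq4 hqlt
          have hmem : lst.getD q 0 ∈ lst := by
            have hg : lst.getD q 0 = lst[q] := by
              simp [List.getD, List.getElem?_eq_getElem hqlt]
            rw [hg]; exact List.getElem_mem hqlt
          have hmf : lst.getD q 0 ∈ lst.filter (fun i => !used.getD i false) :=
            List.mem_filter.mpr ⟨hmem, by simp only [hu, Bool.not_false]⟩
          rw [hfilter, hri] at hmf
          simp at hmf
        rw [hnone, if_neg hqnot]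
      | cons x rtail =>
        obtain ⟨r1, r2, hrem_eq, hr1, hx, hrtail⟩ := List.filter_eq_cons_iff.mp (hremIncdef ▸ hri)
        have hmap : rest.map projE = r1.map (·.1) ++ x.1 :: r2.map (·.1) := by
          rw [hrest, hrem_eq]; simp
        obtain ⟨s1, rest2, hrest_eq, hs1, hrest2⟩ := List.map_eq_append_iff.mp hmap
        obtain ⟨e, s2, hrest2_eq, hpe, hs2⟩ := List.map_eq_cons_iff.mp hrest2
        have hApre : ∀ y ∈ s1, incP look (projE y) = false := by
          intro y hy
          have hmem : projE y ∈ r1.map (·.1) := hs1 ▸ List.mem_map_of_mem hy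
          obtain ⟨z, hz, hzy⟩ := List.mem_map.mp hmem
          rw [← hzy]
          exact Bool.eq_false_iff.mpr (fun hh => (hr1 z hz) hh)
        have hAstep : scanA look rest = some (appOf look x.1, s1 ++ s2) := by
          rw [hrest_eq, hrest2_eq,
            scanA_found look s1 e s2 hApre (by rw [hpe]; exact hx), hpe]
        have hqlt : q < lst.length := by
          by_contra hnot
          have hall : ∀ a ∈ lst, ¬((!used.getD a false) = true) := by
            intro a ha
            obtain ⟨j, hj, hja⟩ := List.mem_iff_getElem.mp ha
            have hu := hbelow j (by omega)
            have hg : lst.getD j 0 = a := by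
              simp [List.getD, List.getElem?_eq_getElem hj, hja]
            rw [hg] at hu
            rw [hu]; simp
          have hemp : lst.filter (fun i => !used.getD i false) = [] :=
            List.filter_eq_nil_iff.mpr hall
          rw [hfilter, hri] at hemp
          simp at hemp
        have hhead : (lst.filter (fun i => !used.getD i false)).head? = some (lst.getD q 0) :=
          head_filter_of_first _ lst q hqlt
            (fun j hj => by have hu := hbelow j hj; rw [hu]; rfl)
            (by rw [hq4 hqlt]; rfl)
        have hiq : lst.getD q 0 = x.2 := by
          rw [hfilter, hri] at hhead
          simpa using hhead.symm
        have hxtE : x ∈ tE := by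
          have hxrem : x ∈ rem := by
            rw [hrem_eq]; exact List.mem_append_right _ List.mem_cons_self
          exact List.mem_of_mem_filter hxrem
        have hxE : x ∈ E.zipIdx := List.mem_of_mem_drop hxtE
        obtain ⟨-, hx2lt, hxval⟩ := List.mem_zipIdx (x := x.1) (i := x.2) (k := 0)
          (by simpa using hxE)
        have hx2lt' : x.2 < E.length := by omega
        have hgetD : E.getD x.2 (0, 0) = x.1 := by
          simp only [List.getD, List.getElem?_eq_getElem hx2lt', Option.getD_some]
          simpa using hxval.symm
        -- the three invariants after this step
        have hlen' : (used.set x.2 true).length = E.length := by simpa using hlen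
        have hsetD : ∀ y ∈ tE, (!(used.set x.2 true).getD y.2 false)
            = ((!decide (y.2 = x.2)) && !used.getD y.2 false) := by
          intro y hy
          obtain ⟨-, hy2, -⟩ := List.mem_zipIdx (x := y.1) (i := y.2) (k := 0)
            (by simpa using List.mem_of_mem_drop hy)
          rw [getD_set_bool used x.2 y.2 (by omega)]
          by_cases h : y.2 = x.2 <;> simp [h]
        have hstep1 : tE.filter (fun y => !(used.set x.2 true).getD y.2 false)
            = rem.filter (fun y => !decide (y.2 = x.2)) := by
          rw [List.filter_congr hsetD, hremdef, List.filter_filter]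
        have hnd : (rem.map (·.2)).Nodup := by
          have h2 : List.Sublist (rem.map (·.2)) (E.zipIdx.map Prod.snd) :=
            (List.filter_sublist.trans (List.drop_sublist 1 E.zipIdx)).map _
          have h3 : (E.zipIdx.map Prod.snd).Nodup := by
            rw [List.zipIdx_map_snd]
            exact List.nodup_range' 1
          exact h3.sublist h2
        have hnotin : ∀ y ∈ r1 ++ r2, ¬(y.2 = x.2) := by
          have h := hnd
          rw [hrem_eq] at h
          simp only [List.map_append, List.map_cons] at h
          intro y hy hyx
          rcases List.mem_append.mp hy with h1 | h2
          · exact (List.disjoint_of_nodup_append h) (hyx ▸ List.mem_map_of_mem h1)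
              List.mem_cons_self
          · have hn2 : (x.2 :: r2.map (·.2)).Nodup := h.of_append_right
            exact (List.nodup_cons.mp hn2).1 (hyx ▸ List.mem_map_of_mem h2)
        have hfilterx : rem.filter (fun y => !decide (y.2 = x.2)) = r1 ++ r2 := by
          rw [hrem_eq, List.filter_append, List.filter_cons]
          simp only [decide_true, Bool.not_true, Bool.false_eq_true, if_false]
          rw [List.filter_eq_self.mpr, List.filter_eq_self.mpr]
          · intro y hy; simpa using hnotin y (List.mem_append_right _ hy)
          · intro y hy; simpa using hnotin y (List.mem_append_left _ hy)
        have hrest' : (s1 ++ s2).map projE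
            = (tE.filter (fun y => !(used.set x.2 true).getD y.2 false)).map (·.1) := by
          rw [hstep1, hfilterx, List.map_append, List.map_append, ← hs1, ← hs2]
        have hpos' : ∀ v : Int, (pos.insert look q).getD v 0 ≤ ((buildInc E).getD v []).length ∧
            ∀ j < (pos.insert look q).getD v 0,
              (used.set x.2 true).getD (((buildInc E).getD v []).getD j 0) false = true := by
          intro v
          by_cases hv : v = look
          · subst hv
            have hgd : (pos.insert v q).getD v 0 = q := by
              simp [PySem.Dict.getD, PySem.Dict.get?_insert_self]
            rw [hgd]
            exact ⟨hq2, fun j hj => used_mono _ _ _ (hbelow j hj)⟩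
          · have hgd : (pos.insert look q).getD v 0 = pos.getD v 0 := by
              simp [PySem.Dict.getD, PySem.Dict.get?_insert_of_ne _ _ hv]
            rw [hgd]
            exact ⟨(hpos v).1, fun j hj => used_mono _ _ _ ((hpos v).2 j hj)⟩
        rw [hAstep, if_pos hqlt, hiq, hgetD]
        exact ih (edge1 ((appOf look x.1).getLastD [])) (outline ++ appOf look x.1) (s1 ++ s2)
          (used.set x.2 true) (pos.insert look q) hlen' hrest' hpos'

theorem getD_replicate_false (n j : Nat) : (List.replicate n false).getD j false = false := by
  simp only [List.getD, List.getElem?_replicate]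
  by_cases h : j < n <;> simp [h]

theorem extract_eq (xs : List (List Int)) : extract_circle xs = extract_circle_alt xs := by
  cases xs with
  | nil => rfl
  | cons e rest =>
    show loopA (edge0 e) rest.length (edge1 e) [[edge0 e, edge1 e]] rest = _
    unfold extract_circle_alt
    simp only []
    set E := (e :: rest).map (fun e => (edge0 e, edge1 e)) with hE
    have hE0 : E.getD 0 (0, 0) = (edge0 e, edge1 e) := rfl
    have hn : (e :: rest).length - 1 = rest.length := by simp
    rw [hE0, hn]
    have hrest0 : rest.map projE
        = ((E.zipIdx.drop 1).filter
            (fun x => !(List.replicate (e :: rest).length false).getD x.2 false)).map (·.1) := by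
      have hfil : (E.zipIdx.drop 1).filter
          (fun x => !(List.replicate (e :: rest).length false).getD x.2 false)
          = E.zipIdx.drop 1 := by
        apply List.filter_eq_self.mpr
        intro y _
        simp [getD_replicate_false]
      rw [hfil, List.map_drop, List.zipIdx_map_fst, hE]
      simp [projE]
    exact loop_eq E (edge0 e) rest.length (edge1 e) [[edge0 e, edge1 e]] rest
      (List.replicate (e :: rest).length false) PySem.Dict.empty
      (by simp [hE]) hrest0
      (fun v => ⟨Nat.zero_le _, fun j hj => by simp at hj⟩)

-- ===== VERDICT (by name: the statement is the Claim_ definition above) =====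
theorem extract_circle_spec : Claim_equal_extract_circle := by
  intro xs _ _
  unfold Spec_extract_circle
  exact extract_eq xs
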